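-- pv_equiv track=rewrite | github.com/sushu0/seismic | new/train_20Hz_thinlayer_v2.py | _count_false_positives
-- ===== SOURCE A (Python) =====
-- def _count_false_positives(pred_boundaries, true_boundaries, tolerance=5):
--     """统计误报的边界数"""
--     fp = 0
--     for pb in pred_boundaries:
--         matched = False
--         for tb in true_boundaries:
--             if abs(pb - tb) <= tolerance:
--                 matched = True
--                 break
--         if not matched:
--             fp += 1
--     return fp // 2  # 边界对计数
-- ===== SOURCE B (Python) =====
-- def _bisect_left(a, x):
--     # standard binary search (CPython's bisect_left algorithm)
--     lo, hi = 0, len(a)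
--     while lo < hi:
--         mid = (lo + hi) // 2
--         if a[mid] < x:
--             lo = mid + 1
--         else:
--             hi = mid
--     return lo
--
--
-- def _count_false_positives(pred_boundaries, true_boundaries, tolerance=5):
--     """统计误报的边界数"""
--     ts = sorted(true_boundaries)
--     fp = 0
--     for pb in pred_boundaries:
--         i = _bisect_left(ts, pb - tolerance)
--         if i >= len(ts) or ts[i] > pb + tolerance:
--             fp += 1
--     return fp // 2  # 边界对计数
-- ===== Notes on version B (the rewrite author's own statement) =====
-- stated objective: faster
-- what changed: Replaces the inner linear scan over true_boundaries with one upfront sort plus a binary search per predicted boundary (first true boundary >= pb - tolerance is checked against pb + tolerance).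
import Mathlib
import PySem

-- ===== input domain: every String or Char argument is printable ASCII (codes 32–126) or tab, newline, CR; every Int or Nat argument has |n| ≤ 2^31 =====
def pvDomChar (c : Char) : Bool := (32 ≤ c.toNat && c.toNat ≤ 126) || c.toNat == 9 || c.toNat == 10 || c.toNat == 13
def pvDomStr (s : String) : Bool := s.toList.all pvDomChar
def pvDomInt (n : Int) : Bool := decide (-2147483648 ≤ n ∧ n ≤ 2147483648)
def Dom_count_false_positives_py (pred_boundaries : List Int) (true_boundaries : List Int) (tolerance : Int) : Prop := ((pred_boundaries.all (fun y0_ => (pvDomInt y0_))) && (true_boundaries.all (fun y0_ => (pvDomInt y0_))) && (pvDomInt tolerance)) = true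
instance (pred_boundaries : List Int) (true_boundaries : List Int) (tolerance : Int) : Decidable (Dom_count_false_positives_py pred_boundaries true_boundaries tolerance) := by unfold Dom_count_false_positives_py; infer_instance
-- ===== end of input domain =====

-- B replaces A's inner linear scan with one upfront sort plus a binary search per predicted boundary.

-- ===== PORT A =====
-- inner loop: 'for tb in true_boundaries: if abs(pb - tb) <= tolerance: matched = True; break'
def pvAMatch (pb : Int) (tolerance : Int) : List Int → Bool
  | [] => false
  | tb :: rest => if |pb - tb| ≤ tolerance then true else pvAMatch pb tolerance rest

def count_false_positives_py (pred_boundaries : List Int) (true_boundaries : List Int) (tolerance : Int) : Int :=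
  let fp := pred_boundaries.foldl (fun fp pb =>
    let matched := pvAMatch pb tolerance true_boundaries
    if !matched then fp + 1 else fp) 0
  PySem.Int.floordiv fp 2

-- ===== PORT B =====
-- Source B's _bisect_left is exactly CPython's bisect_left algorithm, which PySem.List.bisectLeft implements.
def count_false_positives_py_alt (pred_boundaries : List Int) (true_boundaries : List Int) (tolerance : Int) : Int :=
  let ts := PySem.List.sorted true_boundaries (fun x => x) false
  let fp := pred_boundaries.foldl (fun fp pb =>
    let i := PySem.List.bisectLeft ts (pb - tolerance)
    if ts.length ≤ i ∨ pb + tolerance < ts.getD i 0 then fp + 1 else fp) 0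
  PySem.Int.floordiv fp 2

-- ===== PRECONDITION & SPEC =====
def Spec_count_false_positives_py (pred_boundaries : List Int) (true_boundaries : List Int) (tolerance : Int) (out : Int) : Prop := out = count_false_positives_py_alt pred_boundaries true_boundaries tolerance
instance (pred_boundaries : List Int) (true_boundaries : List Int) (tolerance : Int) (out : Int) : Decidable (Spec_count_false_positives_py pred_boundaries true_boundaries tolerance out) := by unfold Spec_count_false_positives_py; infer_instance

-- ===== CLAIM (what is proved, stated in full; the proofs are below) =====
def Claim_equal_count_false_positives_py : Prop := ∀ (pred_boundaries : List Int) (true_boundaries : List Int) (tolerance : Int), Dom_count_false_positives_py pred_boundaries true_boundaries tolerance → Spec_count_false_positives_py pred_boundaries true_boundaries tolerance (count_false_positives_py pred_boundaries true_boundaries tolerance)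

-- ===== LEMMAS AND PROOFS =====

-- A's inner scan decides the existence of a true boundary within tolerance
theorem pvAMatch_iff (pb tolerance : Int) (tbs : List Int) :
    pvAMatch pb tolerance tbs = true ↔ ∃ tb ∈ tbs, |pb - tb| ≤ tolerance := by
  induction tbs with
  | nil => simp [pvAMatch]
  | cons tb rest ih =>
      simp only [pvAMatch]
      by_cases h : |pb - tb| ≤ tolerance
      · simp [h]
      · simp [h, ih]

-- B's branch condition (negated) tests the same existence, via the first sorted element ≥ pb - tolerance
theorem pvBisect_cond_iff (pb tolerance : Int) (ts : List Int)
    (hs : ts.Pairwise (fun a b => a ≤ b)) :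
    (¬ (ts.length ≤ PySem.List.bisectLeft ts (pb - tolerance) ∨
        pb + tolerance < ts.getD (PySem.List.bisectLeft ts (pb - tolerance)) 0)) ↔
      ∃ tb ∈ ts, |pb - tb| ≤ tolerance := by
  obtain ⟨hle, hlt, hge⟩ := PySem.List.bisectLeft_spec ts (pb - tolerance) hs
  set i := PySem.List.bisectLeft ts (pb - tolerance) with hi
  constructor
  · intro h
    rw [not_or, not_le, not_lt] at h
    obtain ⟨hilen, hub⟩ := h
    refine ⟨ts[i], List.getElem_mem hilen, ?_⟩
    have h1 := hge i hilen (le_refl i)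
    have h2 : ts.getD i 0 = ts[i] := List.getD_eq_getElem ts 0 hilen
    rw [h2] at hub
    rw [abs_le]
    omega
  · rintro ⟨tb, htb, habs⟩
    rw [abs_le] at habs
    obtain ⟨j, hj, hjeq⟩ := List.mem_iff_getElem.mp htb
    have hij : i ≤ j := by
      by_contra hc
      have := hlt j hj (by omega)
      omega
    have hilen : i < ts.length := lt_of_le_of_lt hij hj
    have hmono : ts[i] ≤ ts[j] := by
      rcases lt_or_eq_of_le hij with hlt' | heq
      · exact List.pairwise_iff_getElem.mp hs i j hilen hj hlt'
      · simp [heq]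
    rw [not_or, not_le, not_lt]
    refine ⟨hilen, ?_⟩
    rw [List.getD_eq_getElem ts 0 hilen]
    omega

theorem count_false_positives_py_spec : Claim_equal_count_false_positives_py := by
  intro pred_boundaries true_boundaries tolerance _
  unfold Spec_count_false_positives_py
  simp only [count_false_positives_py, count_false_positives_py_alt]
  have hpair : (PySem.List.sorted true_boundaries (fun x => x) false).Pairwise
      (fun a b => a ≤ b) := PySem.List.sorted_pairwise true_boundaries (fun x => x)
  set ts := PySem.List.sorted true_boundaries (fun x => x) false with hts
  congr 1
  have hfun : (fun (fp pb : Int) =>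
        if !pvAMatch pb tolerance true_boundaries then fp + 1 else fp)
      = (fun (fp pb : Int) =>
        if ts.length ≤ PySem.List.bisectLeft ts (pb - tolerance) ∨
            pb + tolerance < ts.getD (PySem.List.bisectLeft ts (pb - tolerance)) 0
        then fp + 1 else fp) := by
    funext fp pb
    have hmem : (∃ tb ∈ ts, |pb - tb| ≤ tolerance) ↔
        (∃ tb ∈ true_boundaries, |pb - tb| ≤ tolerance) := by
      constructor <;> rintro ⟨tb, h1, h2⟩ <;>
        exact ⟨tb, by simpa [PySem.List.mem_sorted, hts] using h1, h2⟩
    have hiff := (pvBisect_cond_iff pb tolerance ts hpair).trans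
      (hmem.trans (pvAMatch_iff pb tolerance true_boundaries).symm)
    by_cases hc : ts.length ≤ PySem.List.bisectLeft ts (pb - tolerance) ∨
        pb + tolerance < ts.getD (PySem.List.bisectLeft ts (pb - tolerance)) 0
    · have hA : pvAMatch pb tolerance true_boundaries = false := by
        rw [← Bool.not_eq_true]
        exact fun hm => (hiff.mpr hm) hc
      rw [hA, if_pos hc]
      simp
    · have hA : pvAMatch pb tolerance true_boundaries = true := hiff.mp hc
      rw [hA, if_neg hc]
      simp
  rw [hfun]
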